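-- pv_equiv track=rewrite | github.com/Hemanth040304/codemind-python | Nearest_Prime.py | prime_right
-- ===== SOURCE A (Python) =====
-- def prime_right(x):
--     while x:
--         fact=0
--         c=2
--         count=0
--         while c<=x//2:
--             if x%c==0:
--                 count+=1
--             c+=1
--         if count==0:
--             return x
--             break
--         x+=1
-- ===== SOURCE B (Python) =====
-- def _odd_is_prime(n):
--     d = 3
--     while d * d <= n:
--         if n % d == 0:
--             return False
--         d += 2
--     return True
--
-- def prime_right(x):
--     if x < 4:
--         return x
--     n = x if x % 2 else x + 1
--     while not _odd_is_prime(n):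
--         n += 2
--     return n
-- ===== Notes on version B (the rewrite author's own statement) =====
-- stated objective: faster
-- what changed: B returns small and nonpositive inputs directly, then searches only odd candidates (an even start is bumped to the next odd) and tests each by trial division with odd divisors up to its square root with early exit, instead of A's per-candidate count of all divisors up to half the candidate.
-- outside the precondition, e.g. on prime_right(0): A returns None, B returns 0
import Mathlib
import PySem

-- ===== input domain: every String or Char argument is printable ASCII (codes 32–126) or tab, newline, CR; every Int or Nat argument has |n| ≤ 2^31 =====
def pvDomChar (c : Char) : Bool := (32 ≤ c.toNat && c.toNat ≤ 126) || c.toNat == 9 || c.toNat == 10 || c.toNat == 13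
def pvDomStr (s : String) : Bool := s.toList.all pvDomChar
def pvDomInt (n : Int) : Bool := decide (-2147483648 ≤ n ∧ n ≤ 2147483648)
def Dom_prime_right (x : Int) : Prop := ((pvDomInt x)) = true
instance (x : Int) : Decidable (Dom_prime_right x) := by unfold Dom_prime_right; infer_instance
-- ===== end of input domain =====

-- B returns x<4 directly, bumps even x to the next odd, then scans only odd candidates,
-- each tested by trial division with odd divisors up to sqrt (early exit), instead of
-- A's count of every divisor up to x//2 per candidate (objective: faster).
-- Pre_ excludes x = 0, where A falls out of its while loop and returns None (not an Int).


-- ===== PORT A =====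
-- inner loop 'while c <= x//2': counts divisors c of x in [2, x//2]; fuel only
-- makes the recursion structural (x.toNat iterations always suffice)
def prAcount (fuel : Nat) (x c count : Int) : Int :=
  match fuel with
  | 0 => count
  | n + 1 =>
    if c ≤ PySem.Int.floordiv x 2 then
      prAcount n x (c + 1) (if PySem.Int.mod x c = 0 then count + 1 else count)
    else count

-- outer loop 'while x:'; fuel bounds the iterations (by Bertrand the search stops well
-- within the budget); on fuel exhaustion or fall-through (x = 0, outside Pre_) returns 0
def prAloop (fuel : Nat) (x : Int) : Int :=
  match fuel with
  | 0 => 0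
  | n + 1 =>
    if x ≠ 0 then
      if prAcount x.toNat x 2 0 = 0 then x else prAloop n (x + 1)
    else 0

def prime_right (x : Int) : Int := prAloop (2 * (x.toNat + 5)) x

-- ===== PORT B =====
-- helper _odd_is_prime: 'while d*d <= n' stepping d by 2 with an early 'return False';
-- fuel only makes the recursion structural (n.toNat iterations always suffice)
def prBodd (fuel : Nat) (n d : Int) : Bool :=
  match fuel with
  | 0 => true
  | f + 1 =>
    if d * d ≤ n then
      if PySem.Int.mod n d = 0 then false else prBodd f n (d + 2)
    else true

-- 'while not _odd_is_prime(n): n += 2'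
def prBsearch (fuel : Nat) (n : Int) : Int :=
  match fuel with
  | 0 => 0
  | f + 1 => if prBodd n.toNat n 3 then n else prBsearch f (n + 2)

def prime_right_alt (x : Int) : Int :=
  if x < 4 then x
  else prBsearch (x.toNat + 5) (if PySem.Int.mod x 2 = 1 then x else x + 1)

-- ===== PRECONDITION & SPEC =====
-- Pre_ excludes only x = 0: there A's 'while x' never runs and A returns None, not an int.
def Pre_prime_right (x : Int) : Prop := x ≠ 0
instance (x : Int) : Decidable (Pre_prime_right x) := by unfold Pre_prime_right; infer_instance
def pvWitness_prime_right : Int := (7)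
def Spec_prime_right (x : Int) (out : Int) : Prop := out = prime_right_alt x
instance (x : Int) (out : Int) : Decidable (Spec_prime_right x out) := by unfold Spec_prime_right; infer_instance

-- ===== CLAIM =====
def Claim_equal_prime_right : Prop := ∀ (x : Int), Dom_prime_right x → Pre_prime_right x → Spec_prime_right x (prime_right x)

-- ===== LEMMAS AND PROOFS =====

lemma prAcount_zero_iff (x : Int) : ∀ (fuel : Nat) (c count : Int), 0 ≤ count →
    (PySem.Int.floordiv x 2 + 1 - c).toNat ≤ fuel →
    (prAcount fuel x c count = 0 ↔
      count = 0 ∧ ∀ d, c ≤ d → d ≤ PySem.Int.floordiv x 2 → PySem.Int.mod x d ≠ 0) := by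
  intro fuel
  induction fuel with
  | zero =>
    intro c count hn hf
    rw [prAcount]
    constructor
    · intro h1; exact ⟨h1, fun d hd hd2 => by omega⟩
    · rintro ⟨h1, -⟩; exact h1
  | succ n ih =>
    intro c count hn hf
    rw [prAcount]
    by_cases h : c ≤ PySem.Int.floordiv x 2
    · rw [if_pos h]
      by_cases hm : PySem.Int.mod x c = 0
      · rw [if_pos hm, ih (c + 1) (count + 1) (by omega) (by omega)]
        constructor
        · rintro ⟨h1, -⟩; omega
        · rintro ⟨-, h2⟩; exact absurd hm (h2 c le_rfl h)
      · rw [if_neg hm, ih (c + 1) count hn (by omega)]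
        constructor
        · rintro ⟨h1, h2⟩
          refine ⟨h1, fun d hd hd2 => ?_⟩
          rcases eq_or_lt_of_le hd with rfl | hlt
          · exact hm
          · exact h2 d (by omega) hd2
        · rintro ⟨h1, h2⟩
          exact ⟨h1, fun d hd hd2 => h2 d (by omega) hd2⟩
    · rw [if_neg h]
      constructor
      · intro h1; exact ⟨h1, fun d hd hd2 => absurd (le_trans hd hd2) h⟩
      · rintro ⟨h1, -⟩; exact h1

lemma prBodd_true_iff (n : Int) : ∀ (fuel : Nat) (d : Int), 0 ≤ d →
    (n + 1 - d).toNat ≤ fuel →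
    (prBodd fuel n d = true ↔
      ∀ e, d ≤ e → e * e ≤ n → (e - d) % 2 = 0 → PySem.Int.mod n e ≠ 0) := by
  intro fuel
  induction fuel with
  | zero =>
    intro d hd0 hf
    rw [prBodd]
    simp only [true_iff]
    intro e he he2 _ _
    have hxd : n < d := by omega
    nlinarith [sq_nonneg (e - 1)]
  | succ f ih =>
    intro d hd0 hf
    rw [prBodd]
    by_cases h : d * d ≤ n
    · rw [if_pos h]
      have hdx : d ≤ n := by nlinarith [sq_nonneg (d - 1)]
      by_cases hm : PySem.Int.mod n d = 0
      · rw [if_pos hm]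
        simp only [Bool.false_eq_true, false_iff, not_forall]
        exact ⟨d, le_rfl, h, by omega, by simpa using hm⟩
      · rw [if_neg hm, ih (d + 2) (by omega) (by omega)]
        constructor
        · intro h2 e he he2 hp
          by_cases hed : e = d
          · subst hed; exact hm
          · exact h2 e (by omega) he2 (by omega)
        · intro h2 e he he2 hp; exact h2 e (by omega) he2 (by omega)
    · rw [if_neg h]
      simp only [true_iff]
      intro e he he2 _ _
      have : d * d ≤ e * e := by nlinarith
      omega

-- bridge: for odd n ≥ 5, A's "no divisor in [2, n//2]" ↔ B's "no odd divisor d ≥ 3 with d*d ≤ n"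
lemma cond_bridge (n : Int) (hn : 5 ≤ n) (hodd : n % 2 = 1) :
    (∀ d, 2 ≤ d → d ≤ PySem.Int.floordiv n 2 → PySem.Int.mod n d ≠ 0) ↔
    (∀ e, 3 ≤ e → e * e ≤ n → (e - 3) % 2 = 0 → PySem.Int.mod n e ≠ 0) := by
  constructor
  · intro hA e he he2 _ hm
    have hd : e ≤ PySem.Int.floordiv n 2 := by
      rw [PySem.Int.le_floordiv_iff_mul_le (by omega)]
      nlinarith
    exact hA e (by omega) hd hm
  · intro hB c hc hd hm
    have hdvd : c ∣ n := (PySem.Int.mod_eq_zero_iff_dvd n c).mp hm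
    obtain ⟨k, hk⟩ := hdvd
    have hcodd : c % 2 = 1 := by
      rcases Int.emod_two_eq c with h | h
      · exfalso
        obtain ⟨c', hc'⟩ : (2 : Int) ∣ c := Int.dvd_of_emod_eq_zero h
        have : (2 : Int) ∣ n := ⟨c' * k, by rw [hk, hc']; ring⟩
        omega
      · exact h
    have h2c : c * 2 ≤ n := (PySem.Int.le_floordiv_iff_mul_le (by omega)).mp hd
    have hkodd : k % 2 = 1 := by
      rcases Int.emod_two_eq k with h | h
      · exfalso
        obtain ⟨k', hk'⟩ : (2 : Int) ∣ k := Int.dvd_of_emod_eq_zero h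
        have : (2 : Int) ∣ n := ⟨c * k', by rw [hk, hk']; ring⟩
        omega
      · exact h
    have hk2 : 2 ≤ k := by nlinarith
    rcases le_total c k with hck | hck
    · exact hB c (by omega) (by nlinarith) (by omega) hm
    · have hmk : PySem.Int.mod n k = 0 :=
        (PySem.Int.mod_eq_zero_iff_dvd n k).mpr ⟨c, by rw [hk]; ring⟩
      exact hB k (by omega) (by nlinarith) (by omega) hmk

lemma fdiv_le (x : Int) : (PySem.Int.floordiv x 2 + 1 - 2).toNat ≤ x.toNat := by
  rw [PySem.Int.floordiv_eq_ediv_of_pos (by omega)]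
  omega

-- A's inner count at an even candidate m ≥ 4 is nonzero (divisor 2)
lemma prAcount_even (m : Int) (h4 : 4 ≤ m) (hev : m % 2 = 0) :
    prAcount m.toNat m 2 0 ≠ 0 := by
  intro h
  have := (prAcount_zero_iff m m.toNat 2 0 le_rfl (fdiv_le m)).mp h
  refine this.2 2 le_rfl ?_ ?_
  · rw [PySem.Int.le_floordiv_iff_mul_le (by omega)]; omega
  · rw [PySem.Int.mod_eq_emod_of_pos (by omega)]; omega

-- A returns immediately for nonzero x < 4: the divisor range [2, x//2] is empty
lemma prAcount_small (x : Int) (hx : x < 4) : prAcount x.toNat x 2 0 = 0 := by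
  rw [prAcount_zero_iff x x.toNat 2 0 le_rfl (fdiv_le x)]
  refine ⟨rfl, fun d hd hd2 => absurd (le_trans hd hd2) ?_⟩
  rw [PySem.Int.floordiv_eq_ediv_of_pos (by omega)]
  omega

-- A's primality condition at an odd candidate agrees with B's trial test
lemma check_eq (n : Int) (hn : 5 ≤ n) (hodd : n % 2 = 1) :
    (prAcount n.toNat n 2 0 = 0) ↔ (prBodd n.toNat n 3 = true) := by
  rw [prAcount_zero_iff n n.toNat 2 0 le_rfl (fdiv_le n),
      prBodd_true_iff n n.toNat 3 (by omega) (by omega)]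
  constructor
  · rintro ⟨-, h⟩; exact (cond_bridge n hn hodd).mp h
  · intro h; exact ⟨rfl, (cond_bridge n hn hodd).mpr h⟩

-- simulation, odd start: one B step = two A steps (the even intermediate always fails)
lemma loop_odd : ∀ (f : Nat) (n : Int), 5 ≤ n → n % 2 = 1 →
    prAloop (2 * f) n = prBsearch f n := by
  intro f
  induction f with
  | zero => intro n _ _; rfl
  | succ f ih =>
    intro n hn hodd
    have h2 : 2 * (f + 1) = (2 * f + 1) + 1 := by omega
    rw [h2, prAloop, prBsearch, if_pos (by omega : n ≠ 0)]
    by_cases hc : prAcount n.toNat n 2 0 = 0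
    · rw [if_pos hc, if_pos ((check_eq n hn hodd).mp hc)]
    · rw [if_neg hc, if_neg (by rw [← check_eq n hn hodd]; exact hc)]
      rw [prAloop, if_pos (by omega : n + 1 ≠ 0),
          if_neg (prAcount_even (n + 1) (by omega) (by omega))]
      have e1 : n + 1 + 1 = n + 2 := by ring
      rw [e1]
      exact ih (n + 2) (by omega) (by omega)

-- simulation, even start m: B starts at m+1; A burns one step on m then proceeds as above
lemma loop_even : ∀ (f : Nat) (m : Int), 4 ≤ m → m % 2 = 0 →
    prAloop (2 * f) m = prBsearch f (m + 1) := by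
  intro f
  induction f with
  | zero => intro m _ _; rfl
  | succ f ih =>
    intro m hm hev
    have h2 : 2 * (f + 1) = (2 * f + 1) + 1 := by omega
    rw [h2, prAloop, prBsearch, if_pos (by omega : m ≠ 0),
        if_neg (prAcount_even m hm hev)]
    rw [prAloop, if_pos (by omega : m + 1 ≠ 0)]
    by_cases hc : prAcount (m + 1).toNat (m + 1) 2 0 = 0
    · rw [if_pos hc, if_pos ((check_eq (m + 1) (by omega) (by omega)).mp hc)]
    · rw [if_neg hc, if_neg (by rw [← check_eq (m + 1) (by omega) (by omega)]; exact hc)]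
      have e1 : m + 1 + 1 = m + 2 := by ring
      have e2 : m + 1 + 2 = m + 2 + 1 := by ring
      rw [e1, e2, ih (m + 2) (by omega) (by omega)]

-- ===== VERDICT =====
theorem prime_right_spec : Claim_equal_prime_right := by
  intro x _ hx
  unfold Spec_prime_right prime_right prime_right_alt
  by_cases h4 : x < 4
  · rw [if_pos h4]
    obtain ⟨k, hk⟩ : ∃ k, 2 * (x.toNat + 5) = k + 1 := ⟨2 * (x.toNat + 5) - 1, by omega⟩
    rw [hk, prAloop, if_pos (show x ≠ 0 from hx), if_pos (prAcount_small x h4)]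
  · rw [if_neg h4]
    rcases Int.emod_two_eq x with hev | hodd
    · rw [if_neg (by rw [PySem.Int.mod_eq_emod_of_pos (by omega)]; omega)]
      exact loop_even (x.toNat + 5) x (by omega) hev
    · rw [if_pos (by rw [PySem.Int.mod_eq_emod_of_pos (by omega)]; omega)]
      exact loop_odd (x.toNat + 5) x (by omega) hodd
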